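-- pv_equiv track=rewrite | github.com/rlecomte1929/rolec | backend/services/policy_rule_comparison_readiness.py | _aggregate_levels
-- ===== SOURCE A (Python) =====
-- from typing import Any, Dict, List, Optional, Set
--
-- RULE_COMPARISON_FULL = "full"
--
-- RULE_COMPARISON_PARTIAL = "partial"
--
-- RULE_COMPARISON_NOT_READY = "not_ready"
--
-- def _aggregate_levels(levels: List[str]) -> str:
--     if not levels:
--         return RULE_COMPARISON_NOT_READY
--     if any(x == RULE_COMPARISON_NOT_READY for x in levels):
--         if any(x == RULE_COMPARISON_FULL for x in levels):
--             return RULE_COMPARISON_PARTIAL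
--         if any(x == RULE_COMPARISON_PARTIAL for x in levels):
--             return RULE_COMPARISON_PARTIAL
--         return RULE_COMPARISON_NOT_READY
--     if all(x == RULE_COMPARISON_FULL for x in levels):
--         return RULE_COMPARISON_FULL
--     if RULE_COMPARISON_FULL in levels:
--         return RULE_COMPARISON_PARTIAL
--     return RULE_COMPARISON_PARTIAL
-- ===== SOURCE B (Python) =====
-- RULE_COMPARISON_FULL = "full"
-- RULE_COMPARISON_PARTIAL = "partial"
-- RULE_COMPARISON_NOT_READY = "not_ready"
--
-- def _rank(x):
--     # abstract one level into a lattice element (g, n):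
--     # g: 2 = full, 1 = good-but-not-full (partial), 0 = no readiness signal;
--     # n: a not_ready marker was seen.
--     if x == RULE_COMPARISON_FULL:
--         return (2, False)
--     if x == RULE_COMPARISON_NOT_READY:
--         return (0, True)
--     if x == RULE_COMPARISON_PARTIAL:
--         return (1, False)
--     return (0, False)
--
-- def _join(a, b):
--     # commutative join: 2 survives only if both sides are 2; any positive side gives 1.
--     g = 2 if (a[0] == 2 and b[0] == 2) else (1 if (a[0] >= 1 or b[0] >= 1) else 0)
--     return (g, a[1] or b[1])
--
-- def _aggregate_levels(levels):
--     if not levels: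
--         return RULE_COMPARISON_NOT_READY
--     g, n = _rank(levels[0])
--     for x in levels[1:]:
--         g, n = _join((g, n), _rank(x))
--     if g == 2:
--         return RULE_COMPARISON_FULL
--     if g == 0 and n:
--         return RULE_COMPARISON_NOT_READY
--     return RULE_COMPARISON_PARTIAL
-- ===== Notes on version B (the rewrite author's own statement) =====
-- stated objective: alternative
-- what changed: Replaces A's five staged any/all/in scans and nested branches with a single pass that maps each level to a small lattice element (rank 2/1/0 plus a not_ready flag) and folds them with a commutative join, then decodes the joined element into the status.
import Mathlib
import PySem

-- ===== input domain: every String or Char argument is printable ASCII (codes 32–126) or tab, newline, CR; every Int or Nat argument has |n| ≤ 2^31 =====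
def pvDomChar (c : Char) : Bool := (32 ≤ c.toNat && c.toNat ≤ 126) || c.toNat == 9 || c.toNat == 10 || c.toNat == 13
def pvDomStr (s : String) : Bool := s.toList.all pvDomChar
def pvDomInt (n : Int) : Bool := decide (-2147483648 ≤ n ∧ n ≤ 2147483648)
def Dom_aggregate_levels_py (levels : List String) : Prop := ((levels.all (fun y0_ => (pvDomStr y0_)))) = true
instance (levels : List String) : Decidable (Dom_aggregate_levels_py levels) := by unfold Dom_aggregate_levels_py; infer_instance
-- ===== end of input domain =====

-- B replaces A's five staged any/all/in scans and nested branches with a single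
-- fold of per-element lattice values under a commutative join (objective: alternative).

def RULE_COMPARISON_FULL : String := "full"
def RULE_COMPARISON_PARTIAL : String := "partial"
def RULE_COMPARISON_NOT_READY : String := "not_ready"

-- ===== PORT A =====
def aggregate_levels_py (levels : List String) : String :=
  if levels.isEmpty then RULE_COMPARISON_NOT_READY
  else if levels.any (fun x => x == RULE_COMPARISON_NOT_READY) then
    if levels.any (fun x => x == RULE_COMPARISON_FULL) then RULE_COMPARISON_PARTIAL
    else if levels.any (fun x => x == RULE_COMPARISON_PARTIAL) then RULE_COMPARISON_PARTIAL
    else RULE_COMPARISON_NOT_READY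
  else if levels.all (fun x => x == RULE_COMPARISON_FULL) then RULE_COMPARISON_FULL
  else if levels.contains RULE_COMPARISON_FULL then RULE_COMPARISON_PARTIAL
  else RULE_COMPARISON_PARTIAL

-- ===== PORT B =====
def pvRank (x : String) : Int × Bool :=
  if x == RULE_COMPARISON_FULL then (2, false)
  else if x == RULE_COMPARISON_NOT_READY then (0, true)
  else if x == RULE_COMPARISON_PARTIAL then (1, false)
  else (0, false)

def pvJoin (a b : Int × Bool) : Int × Bool :=
  ((if a.1 == 2 && b.1 == 2 then (2 : Int) else if a.1 ≥ 1 || b.1 ≥ 1 then 1 else 0),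
   a.2 || b.2)

def aggregate_levels_py_alt (levels : List String) : String :=
  match levels with
  | [] => RULE_COMPARISON_NOT_READY
  | x :: xs =>
    let acc := xs.foldl (fun s y => pvJoin s (pvRank y)) (pvRank x)
    if acc.1 == 2 then RULE_COMPARISON_FULL
    else if acc.1 == 0 && acc.2 then RULE_COMPARISON_NOT_READY
    else RULE_COMPARISON_PARTIAL

-- ===== PRECONDITION & SPEC =====
def Spec_aggregate_levels_py (levels : List String) (out : String) : Prop := out = aggregate_levels_py_alt levels
instance (levels : List String) (out : String) : Decidable (Spec_aggregate_levels_py levels out) := by unfold Spec_aggregate_levels_py; infer_instance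

-- ===== CLAIM (what is proved, stated in full; the proofs are below) =====
def Claim_equal_aggregate_levels_py : Prop := ∀ (levels : List String), Dom_aggregate_levels_py levels → Spec_aggregate_levels_py levels (aggregate_levels_py levels)

-- ===== LEMMAS AND PROOFS =====

-- closed form of B's fold: first component records "all full" / "some full-or-partial",
-- second component records "some not_ready"
set_option maxHeartbeats 1000000 in
theorem pv_fold_closed (ys : List String) (s : Int × Bool) (hs : s.1 = 0 ∨ s.1 = 1 ∨ s.1 = 2) :
    ys.foldl (fun a y => pvJoin a (pvRank y)) s =
      ((if s.1 = 2 ∧ ys.all (fun y => y == RULE_COMPARISON_FULL) then (2 : Int)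
        else if 1 ≤ s.1 ∨ ys.any (fun y => y == RULE_COMPARISON_FULL || y == RULE_COMPARISON_PARTIAL) then 1
        else 0),
       s.2 || ys.any (fun y => y == RULE_COMPARISON_NOT_READY)) := by
  induction ys generalizing s with
  | nil =>
    rcases hs with h | h | h <;>
      simp_all [Prod.ext_iff]
  | cons y ys ih =>
    simp only [List.foldl_cons, List.all_cons, List.any_cons]
    rw [ih (pvJoin s (pvRank y)) (by unfold pvJoin; dsimp; split_ifs <;> simp)]
    rcases hs with h | h | h <;>
      by_cases hF : y = RULE_COMPARISON_FULL <;>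
      by_cases hN : y = RULE_COMPARISON_NOT_READY <;>
      by_cases hP : y = RULE_COMPARISON_PARTIAL <;>
      simp_all [pvJoin, pvRank, RULE_COMPARISON_FULL, RULE_COMPARISON_NOT_READY,
                RULE_COMPARISON_PARTIAL, Prod.ext_iff, beq_iff_eq] <;>
      · have hb : (y == "not_ready") = false := beq_eq_false_iff_ne.mpr (by simp_all)
        simp [hb]

-- an all-scan forbids any disjoint any-scan
theorem pv_all_any (l : List String) (p q : String → Bool)
    (h : ∀ y, p y = true → q y = false) : l.all p = true → l.any q = false := by
  simp only [List.all_eq_true, List.any_eq_false]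
  intro ha y hy
  simp [h y (ha y hy)]

theorem pv_any_or (l : List String) (p q : String → Bool) :
    (l.any fun y => p y || q y) = (l.any p || l.any q) := by
  induction l with
  | nil => rfl
  | cons y l ih => simp [List.any_cons, ih, Bool.or_assoc, Bool.or_left_comm]

-- ===== VERDICT (by name: the statement is the Claim_ definition above) =====
set_option maxHeartbeats 1000000 in
theorem aggregate_levels_py_spec : Claim_equal_aggregate_levels_py := by
  intro levels _
  unfold Spec_aggregate_levels_py
  cases levels with
  | nil => rfl
  | cons x xs =>
    unfold aggregate_levels_py aggregate_levels_py_alt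
    dsimp only
    rw [pv_fold_closed xs (pvRank x) (by unfold pvRank; split_ifs <;> simp)]
    rw [pv_any_or]
    have k1 : xs.all (fun y => y == RULE_COMPARISON_FULL) = true →
        xs.any (fun y => y == RULE_COMPARISON_NOT_READY) = false :=
      pv_all_any xs _ _ (by
        intro y hy
        have hy' : y = RULE_COMPARISON_FULL := by simpa using hy
        simp [hy', RULE_COMPARISON_FULL, RULE_COMPARISON_NOT_READY])
    have k2 : xs.all (fun y => y == RULE_COMPARISON_FULL) = true →
        xs.any (fun y => y == RULE_COMPARISON_PARTIAL) = false :=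
      pv_all_any xs _ _ (by
        intro y hy
        have hy' : y = RULE_COMPARISON_FULL := by simpa using hy
        simp [hy', RULE_COMPARISON_FULL, RULE_COMPARISON_PARTIAL])
    by_cases hF : x = RULE_COMPARISON_FULL <;>
    by_cases hN : x = RULE_COMPARISON_NOT_READY <;>
    by_cases hP : x = RULE_COMPARISON_PARTIAL <;>
    by_cases aN : xs.any (fun y => y == RULE_COMPARISON_NOT_READY) = true <;>
    by_cases aF : xs.any (fun y => y == RULE_COMPARISON_FULL) = true <;>
    by_cases aP : xs.any (fun y => y == RULE_COMPARISON_PARTIAL) = true <;>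
    by_cases aA : xs.all (fun y => y == RULE_COMPARISON_FULL) = true <;>
    simp_all [pvRank, RULE_COMPARISON_FULL, RULE_COMPARISON_NOT_READY,
              RULE_COMPARISON_PARTIAL, List.any_cons, List.all_cons, beq_iff_eq] <;>
    (try (split_ifs <;> omega)) <;>
    exact absurd rfl (k1 aA _ aN)
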